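-- pv_equiv track=rewrite | github.com/devicki/finradar | scripts/cluster_dryrun.py | _format_distribution
-- ===== SOURCE A (Python) =====
-- def _format_distribution(title: str, dist: list[tuple[int, int]]) -> str:
--     lines = [f"--- {title} ---"]
--     if not dist:
--         lines.append("  (no non-singleton clusters)")
--         return "\n".join(lines)
--     largest = max(s for s, _ in dist)
--     over_50 = sum(n for s, n in dist if s >= 50)
--     over_100 = sum(n for s, n in dist if s >= 100)
--     total_non_singleton = sum(n for _, n in dist)
--     lines.append(
--         f"  non-singleton clusters={total_non_singleton}  "
--         f"largest={largest}  clusters(>=50)={over_50}  clusters(>=100)={over_100}"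
--     )
--     for s, n in dist[:15]:
--         lines.append(f"  size={s:5d}  clusters={n}")
--     return "\n".join(lines)
-- ===== SOURCE B (Python) =====
-- def _format_distribution(title: str, dist: list[tuple[int, int]]) -> str:
--     lines = [f"--- {title} ---"]
--     if not dist:
--         lines.append("  (no non-singleton clusters)")
--         return "\n".join(lines)
--     by_size = sorted(dist, key=lambda p: p[0], reverse=True)
--     largest = by_size[0][0]
--     total_non_singleton = sum(n for _, n in dist)
--     i = 0
--     over_100 = 0
--     while i < len(by_size) and by_size[i][0] >= 100:
--         over_100 += by_size[i][1]
--         i += 1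
--     over_50 = over_100
--     while i < len(by_size) and by_size[i][0] >= 50:
--         over_50 += by_size[i][1]
--         i += 1
--     lines.append(
--         f"  non-singleton clusters={total_non_singleton}  "
--         f"largest={largest}  clusters(>=50)={over_50}  clusters(>=100)={over_100}"
--     )
--     for s, n in dist[:15]:
--         lines.append(f"  size={s:5d}  clusters={n}")
--     return "\n".join(lines)
-- ===== Notes on version B (the rewrite author's own statement) =====
-- stated objective: alternative
-- what changed: Instead of A's four whole-list traversals (max plus three filtered sums), B sorts dist by size descending, reads the largest size off the head of the sorted copy, and computes the threshold counts with two early-terminating pointer scans over the sorted prefix, the >=50 scan resuming from the >=100 accumulator; the total sum and all formatting are unchanged.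
import Mathlib
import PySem

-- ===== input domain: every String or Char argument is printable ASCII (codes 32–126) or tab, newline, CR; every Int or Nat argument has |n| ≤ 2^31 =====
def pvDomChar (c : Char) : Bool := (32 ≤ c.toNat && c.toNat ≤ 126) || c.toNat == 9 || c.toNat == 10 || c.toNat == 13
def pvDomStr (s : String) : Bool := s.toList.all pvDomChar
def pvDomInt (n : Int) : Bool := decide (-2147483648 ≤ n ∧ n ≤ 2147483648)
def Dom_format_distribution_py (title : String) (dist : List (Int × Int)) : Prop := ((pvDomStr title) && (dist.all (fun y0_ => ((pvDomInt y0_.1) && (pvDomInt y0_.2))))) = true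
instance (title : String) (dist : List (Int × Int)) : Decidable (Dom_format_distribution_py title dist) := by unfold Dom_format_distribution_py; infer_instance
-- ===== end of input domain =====

-- B sorts dist by size descending, reads the largest size off the head, and obtains the
-- threshold counts by two early-terminating pointer scans over the sorted prefix (the >=50
-- count resumes from the >=100 accumulator); same output as A's four whole-list traversals.


-- f"{s:5d}": str(s) right-aligned in width 5 (shared formatting helper, used by both ports)
def pvPad5 (n : Int) : String :=
  let t := PySem.Int.toChars n
  String.ofList (List.replicate (5 - t.length) ' ' ++ t)

-- f"  size={s:5d}  clusters={n}" (identical display line in both Pythons)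
def pvSizeLine (p : Int × Int) : String :=
  "  size=" ++ pvPad5 p.1 ++ "  clusters=" ++ PySem.Int.toStr p.2

-- ===== PORT A =====
def format_distribution_py (title : String) (dist : List (Int × Int)) : String :=
  let lines : List String := ["--- " ++ title ++ " ---"]
  match dist with
  | [] => PySem.Str.join "\n" (lines ++ ["  (no non-singleton clusters)"])
  | (s0, _) :: rest =>
    -- max(s for s, _ in dist): fold of max over the sizes, seeded with the first
    let largest : Int := rest.foldl (fun m q => max m q.1) s0
    let over_50 : Int := ((dist.filter (fun q => decide (q.1 ≥ 50))).map (fun q => q.2)).sum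
    let over_100 : Int := ((dist.filter (fun q => decide (q.1 ≥ 100))).map (fun q => q.2)).sum
    let total_non_singleton : Int := (dist.map (fun q => q.2)).sum
    let lines := lines ++
      ["  non-singleton clusters=" ++ PySem.Int.toStr total_non_singleton ++
       "  largest=" ++ PySem.Int.toStr largest ++
       "  clusters(>=50)=" ++ PySem.Int.toStr over_50 ++
       "  clusters(>=100)=" ++ PySem.Int.toStr over_100]
    let lines := lines ++ (PySem.List.slice dist none (some 15)).map pvSizeLine
    PySem.Str.join "\n" lines

-- ===== PORT B =====
-- one 'while i < len(l) and l[i][0] >= c' accumulating scan: consumes the prefix with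
-- size >= c, adds its counts to acc, returns (acc, remaining suffix)
def pvScanGE (c : Int) (acc : Int) : List (Int × Int) → Int × List (Int × Int)
  | [] => (acc, [])
  | q :: rest => if q.1 ≥ c then pvScanGE c (acc + q.2) rest else (acc, q :: rest)

def format_distribution_py_alt (title : String) (dist : List (Int × Int)) : String :=
  match dist with
  | [] => PySem.Str.join "\n" ["--- " ++ title ++ " ---", "  (no non-singleton clusters)"]
  | _ :: _ =>
    -- by_size = sorted(dist, key=lambda p: p[0], reverse=True)
    let by_size := PySem.List.sorted dist (fun p => p.1) true
    -- by_size[0][0]; by_size is nonempty because dist is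
    let largest : Int := match by_size with | [] => 0 | m :: _ => m.1
    let total_non_singleton : Int := (dist.map (fun q => q.2)).sum
    let st100 := pvScanGE 100 0 by_size
    let st50 := pvScanGE 50 st100.1 st100.2
    PySem.Str.join "\n"
      (["--- " ++ title ++ " ---",
        "  non-singleton clusters=" ++ PySem.Int.toStr total_non_singleton ++
        "  largest=" ++ PySem.Int.toStr largest ++
        "  clusters(>=50)=" ++ PySem.Int.toStr st50.1 ++
        "  clusters(>=100)=" ++ PySem.Int.toStr st100.1]
       ++ (PySem.List.slice dist none (some 15)).map pvSizeLine)

-- ===== PRECONDITION & SPEC =====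
def Spec_format_distribution_py (title : String) (dist : List (Int × Int)) (out : String) : Prop := out = format_distribution_py_alt title dist
instance (title : String) (dist : List (Int × Int)) (out : String) : Decidable (Spec_format_distribution_py title dist out) := by unfold Spec_format_distribution_py; infer_instance

-- ===== CLAIM =====
def Claim_equal_format_distribution_py : Prop := ∀ (title : String) (dist : List (Int × Int)), Dom_format_distribution_py title dist → Spec_format_distribution_py title dist (format_distribution_py title dist)

-- ===== LEMMAS AND PROOFS =====

-- the scan is takeWhile-sum plus the leftover suffix
lemma pvScanGE_eq (c acc : Int) (l : List (Int × Int)) :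
    pvScanGE c acc l =
      (acc + ((l.takeWhile (fun q => decide (q.1 ≥ c))).map (fun q => q.2)).sum,
       l.dropWhile (fun q => decide (q.1 ≥ c))) := by
  induction l generalizing acc with
  | nil => simp [pvScanGE]
  | cons q rest ih =>
    by_cases h : q.1 ≥ c
    · simp [pvScanGE, h, ih]; ring
    · simp [pvScanGE, h]

-- on a list sorted by descending size, takeWhile (size >= c) is filter (size >= c)
lemma takeWhile_eq_filter_of_desc (c : Int) (l : List (Int × Int))
    (hs : l.Pairwise (fun a b => b.1 ≤ a.1)) :
    l.takeWhile (fun q => decide (q.1 ≥ c)) = l.filter (fun q => decide (q.1 ≥ c)) := by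
  induction l with
  | nil => rfl
  | cons q rest ih =>
    rcases List.pairwise_cons.mp hs with ⟨hq, hrest⟩
    by_cases h : q.1 ≥ c
    · simp [h, ih hrest]
    · have hd : (decide (q.1 ≥ c)) = false := by simp [h]
      simp only [List.takeWhile_cons, List.filter_cons, hd, Bool.false_eq_true, if_false]
      refine (List.filter_eq_nil_iff.mpr (fun b hb => ?_)).symm
      have := hq b hb
      simp only [decide_eq_true_eq]
      omega

-- count-sum over a filter is invariant under permutation (A filters dist, B scans the sorted copy)
lemma sum_filter_sorted (c : Int) (l : List (Int × Int)) :
    (((PySem.List.sorted l (fun p => p.1) true).filter (fun q => decide (q.1 ≥ c))).map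
        (fun q => q.2)).sum
      = ((l.filter (fun q => decide (q.1 ≥ c))).map (fun q => q.2)).sum :=
  List.Perm.sum_eq (List.Perm.map _ (List.Perm.filter _ (PySem.List.sorted_perm l _ true)))

-- the first scan computes A's over_100
lemma scan100_eq (l : List (Int × Int)) :
    (pvScanGE 100 0 (PySem.List.sorted l (fun p => p.1) true)).1
      = ((l.filter (fun q => decide (q.1 ≥ 100))).map (fun q => q.2)).sum := by
  rw [pvScanGE_eq, takeWhile_eq_filter_of_desc 100 _ (PySem.List.sorted_pairwise_rev l _)]
  simpa using sum_filter_sorted 100 l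

-- the second scan, resumed from over_100 on the leftover suffix, computes A's over_50
lemma scan50_eq (l : List (Int × Int)) :
    (pvScanGE 50 (pvScanGE 100 0 (PySem.List.sorted l (fun p => p.1) true)).1
        (pvScanGE 100 0 (PySem.List.sorted l (fun p => p.1) true)).2).1
      = ((l.filter (fun q => decide (q.1 ≥ 50))).map (fun q => q.2)).sum := by
  set S := PySem.List.sorted l (fun p => p.1) true with hS
  have hpw : S.Pairwise (fun a b => b.1 ≤ a.1) := PySem.List.sorted_pairwise_rev l _
  have hpwd : (S.dropWhile (fun q => decide (q.1 ≥ 100))).Pairwise (fun a b => b.1 ≤ a.1) :=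
    List.Pairwise.sublist (List.dropWhile_sublist _) hpw
  rw [pvScanGE_eq, pvScanGE_eq]
  simp only
  rw [takeWhile_eq_filter_of_desc 50 _ hpwd,
      takeWhile_eq_filter_of_desc 100 _ hpw, zero_add]
  -- split S's filter(>=50) along takeWhile(>=100) ++ dropWhile(>=100)
  have hsplit : ((S.filter (fun q => decide (q.1 ≥ 50))).map (fun q => q.2)).sum
      = ((S.filter (fun q => decide (q.1 ≥ 100))).map (fun q => q.2)).sum
        + (((S.dropWhile (fun q => decide (q.1 ≥ 100))).filter
              (fun q => decide (q.1 ≥ 50))).map (fun q => q.2)).sum := by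
    conv_lhs => rw [← List.takeWhile_append_dropWhile
      (p := fun q => decide (q.1 ≥ 100)) (l := S)]
    rw [List.filter_append, List.map_append, List.sum_append,
        takeWhile_eq_filter_of_desc 100 _ hpw]
    have hself : ((S.filter (fun q => decide (q.1 ≥ 100))).filter
        (fun q => decide (q.1 ≥ 50))) = S.filter (fun q => decide (q.1 ≥ 100)) := by
      rw [List.filter_eq_self]
      intro b hb
      have := List.of_mem_filter hb
      simp only [decide_eq_true_eq] at this ⊢
      omega
    rw [hself]
  have h50 := sum_filter_sorted 50 l
  rw [← hS] at h50
  rw [← h50, hsplit]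

-- foldl max stays among its inputs
lemma foldl_max_mem (l : List Int) (a : Int) :
    l.foldl max a = a ∨ l.foldl max a ∈ l := by
  induction l generalizing a with
  | nil => simp
  | cons x t ih =>
    simp only [List.foldl_cons]
    rcases ih (max a x) with h | h
    · rcases max_choice a x with hm | hm
      · left; rw [h, hm]
      · right; rw [h, hm]; exact List.mem_cons_self
    · right; exact List.mem_cons_of_mem _ h

-- A's fold-max of the sizes equals the head size of the descending sort
lemma largest_eq (d0 : Int × Int) (rest : List (Int × Int)) (m : Int × Int)
    (t : List (Int × Int))
    (h : PySem.List.sorted (d0 :: rest) (fun p => p.1) true = m :: t) :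
    rest.foldl (fun acc q => max acc q.1) d0.1 = m.1 := by
  have hfold : rest.foldl (fun acc q => max acc q.1) d0.1
      = (rest.map (fun q => q.1)).foldl max d0.1 := by
    rw [List.foldl_map]
  have hub := PySem.List.key_head_sorted_rev_ge (d0 :: rest) (fun p => p.1) h
  have hmmem : m ∈ d0 :: rest := by
    rw [← PySem.List.mem_sorted _ (fun p => p.1) true, h]; exact List.mem_cons_self
  have hle := PySem.List.le_foldl_max (rest.map (fun q => q.1)) d0.1
  rw [hfold]
  apply le_antisymm
  · rcases foldl_max_mem (rest.map (fun q => q.1)) d0.1 with he | he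
    · rw [he]; exact hub d0 List.mem_cons_self
    · rcases List.mem_map.mp he with ⟨q, hq, hqe⟩
      rw [← hqe]; exact hub q (List.mem_cons_of_mem _ hq)
  · rcases List.mem_cons.mp hmmem with he | he
    · rw [he]; exact hle.1
    · exact hle.2 m.1 (List.mem_map.mpr ⟨m, he, rfl⟩)

-- ===== VERDICT =====
theorem format_distribution_py_spec : Claim_equal_format_distribution_py := by
  intro title dist _
  unfold Spec_format_distribution_py
  cases dist with
  | nil => rfl
  | cons d0 rest =>
    obtain ⟨s0, n0⟩ := d0
    cases hS : PySem.List.sorted ((s0, n0) :: rest) (fun p => p.1) true with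
    | nil => exact absurd ((PySem.List.sorted_eq_nil_iff _ _ _).mp hS) (by simp)
    | cons m t =>
      simp only [format_distribution_py, format_distribution_py_alt, hS]
      rw [largest_eq (s0, n0) rest m t hS,
          ← hS, scan50_eq ((s0, n0) :: rest), scan100_eq ((s0, n0) :: rest)]
      rfl
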